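-- pv_equiv track=rewrite | github.com/ruben-vl/aoc | python/2408.py | antinodes
-- ===== SOURCE A (Python) =====
-- def antinodes(character1, character2) -> set[tuple[int, int]]:
--     row_idx1, col_idx1, char1 = character1
--     row_idx2, col_idx2, char2 = character2
--     row_diff, col_diff = abs(row_idx1 - row_idx2), abs(col_idx1 - col_idx2)
--     if (row_idx1 >= row_idx2 and col_idx1 >= col_idx2) or (row_idx2 >= row_idx1 and col_idx2 >= col_idx1):
--         antinode1 = min(row_idx1, row_idx2) - row_diff, min(col_idx1, col_idx2) - col_diff
--         antinode2 = max(row_idx1, row_idx2) + row_diff, max(col_idx1, col_idx2) + col_diff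
--     else:
--         antinode1 = min(row_idx1, row_idx2) - row_diff, max(col_idx1, col_idx2) + col_diff
--         antinode2 = max(row_idx1, row_idx2) + row_diff, min(col_idx1, col_idx2) - col_diff
--     return {node for node in {antinode1, antinode2} if 0 <= node[0] < 12 and 0 <= node[1] < 12}
-- ===== SOURCE B (Python) =====
-- def antinodes(character1, character2) -> set[tuple[int, int]]:
--     # Brute-force grid scan: a cell q is an antinode of p1,p2 iff the step from
--     # q to one antenna equals the step between the antennas (q = 2*p - p').
--     r1, c1 = character1[0], character1[1]
--     r2, c2 = character2[0], character2[1]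
--     result = set()
--     for r in range(12):
--         for c in range(12):
--             if (r1 - r == r2 - r1 and c1 - c == c2 - c1) or \
--                (r2 - r == r1 - r2 and c2 - c == c1 - c2):
--                 result.add((r, c))
--     return result
-- ===== Notes on version B (the rewrite author's own statement) =====
-- stated objective: alternative
-- what changed: Replaces A's direct construction of the two candidate points via quadrant case-analysis with abs/min/max by a brute-force scan of all 144 grid cells, keeping each cell whose displacement to one antenna equals the displacement between the antennas.
import Mathlib
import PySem

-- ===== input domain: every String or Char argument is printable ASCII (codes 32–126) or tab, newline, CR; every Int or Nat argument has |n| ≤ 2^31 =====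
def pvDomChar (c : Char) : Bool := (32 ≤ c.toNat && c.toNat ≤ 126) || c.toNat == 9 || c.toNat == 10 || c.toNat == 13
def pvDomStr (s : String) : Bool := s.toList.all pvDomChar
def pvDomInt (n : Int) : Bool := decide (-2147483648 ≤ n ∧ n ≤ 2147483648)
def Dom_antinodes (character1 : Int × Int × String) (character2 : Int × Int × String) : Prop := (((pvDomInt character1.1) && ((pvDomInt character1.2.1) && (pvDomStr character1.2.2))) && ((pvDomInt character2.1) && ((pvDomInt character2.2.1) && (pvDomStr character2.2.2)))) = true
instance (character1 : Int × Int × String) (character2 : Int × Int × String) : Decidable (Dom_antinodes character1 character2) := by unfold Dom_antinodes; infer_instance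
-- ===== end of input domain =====

-- B replaces A's quadrant case-analysis (abs/min/max) by a brute-force scan of the
-- fixed 12x12 grid keeping the cells whose offset to an antenna mirrors the antenna pair;
-- objective: alternative (same result, different algorithm; not faster).


-- in-bounds test '0 <= node[0] < 12 and 0 <= node[1] < 12' of A's set comprehension
def pvInBounds (node : Int × Int) : Bool :=
  decide (0 ≤ node.1 ∧ node.1 < 12) && decide (0 ≤ node.2 ∧ node.2 < 12)

-- ===== PORT A =====
def antinodes (character1 : Int × Int × String) (character2 : Int × Int × String) : List (Int × Int) :=
  let row1 := character1.1
  let col1 := character1.2.1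
  let row2 := character2.1
  let col2 := character2.2.1
  let rowDiff := |row1 - row2|
  let colDiff := |col1 - col2|
  let pair :=
    if (row1 ≥ row2 ∧ col1 ≥ col2) ∨ (row2 ≥ row1 ∧ col2 ≥ col1) then
      ((min row1 row2 - rowDiff, min col1 col2 - colDiff),
       (max row1 row2 + rowDiff, max col1 col2 + colDiff))
    else
      ((min row1 row2 - rowDiff, max col1 col2 + colDiff),
       (max row1 row2 + rowDiff, min col1 col2 - colDiff))
  -- {node for node in {antinode1, antinode2} if <in bounds>}
  PySem.Set.ofList (List.filter pvInBounds (PySem.Set.ofList [pair.1, pair.2]))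

-- ===== PORT B =====
def antinodes_alt (character1 : Int × Int × String) (character2 : Int × Int × String) : List (Int × Int) :=
  let r1 := character1.1
  let c1 := character1.2.1
  let r2 := character2.1
  let c2 := character2.2.1
  -- for r in range(12): for c in range(12): if <cell mirrors an antenna>: result.add((r, c))
  (PySem.List.pyRange 0 12 1).foldl (fun result r =>
    (PySem.List.pyRange 0 12 1).foldl (fun result c =>
      if (r1 - r = r2 - r1 ∧ c1 - c = c2 - c1) ∨ (r2 - r = r1 - r2 ∧ c2 - c = c1 - c2) then
        PySem.Set.add result (r, c)
      else result) result) []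

-- ===== PRECONDITION & SPEC =====
def Spec_antinodes (character1 : Int × Int × String) (character2 : Int × Int × String) (out : List (Int × Int)) : Prop := out = antinodes_alt character1 character2
instance (character1 : Int × Int × String) (character2 : Int × Int × String) (out : List (Int × Int)) : Decidable (Spec_antinodes character1 character2 out) := by unfold Spec_antinodes; infer_instance

-- ===== CLAIM (what is proved, stated in full; the proofs are below) =====
def Claim_equal_antinodes : Prop := ∀ (character1 : Int × Int × String) (character2 : Int × Int × String), Dom_antinodes character1 character2 → Spec_antinodes character1 character2 (antinodes character1 character2)

-- ===== LEMMAS AND PROOFS =====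

-- the full 12x12 grid in row-major order
def pvGrid : List (Int × Int) :=
  (PySem.List.pyRange 0 12 1).flatMap (fun r => (PySem.List.pyRange 0 12 1).map (fun c => (r, c)))

-- lexicographic strict order on cells
def pvLexLt (x y : Int × Int) : Prop := x.1 < y.1 ∨ (x.1 = y.1 ∧ x.2 < y.2)

lemma pvMem_grid (q : Int × Int) :
    q ∈ pvGrid ↔ (0 ≤ q.1 ∧ q.1 < 12 ∧ 0 ≤ q.2 ∧ q.2 < 12) := by
  rcases q with ⟨a, b⟩
  constructor
  · intro h
    obtain ⟨r, hr, hq⟩ := List.mem_flatMap.mp h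
    obtain ⟨c, hc, he⟩ := List.mem_map.mp hq
    obtain ⟨rfl, rfl⟩ := Prod.mk.injEq .. |>.mp he.symm
    rw [PySem.List.mem_pyRange_one] at hr hc
    exact ⟨hr.1, hr.2, hc.1, hc.2⟩
  · rintro ⟨h1, h2, h3, h4⟩
    exact List.mem_flatMap.mpr ⟨a, (PySem.List.mem_pyRange_one).mpr ⟨h1, h2⟩,
      List.mem_map.mpr ⟨b, (PySem.List.mem_pyRange_one).mpr ⟨h3, h4⟩, rfl⟩⟩

lemma pvGrid_sorted : pvGrid.Pairwise pvLexLt := by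
  unfold pvGrid
  apply List.pairwise_flatMap.mpr
  refine ⟨?_, ?_⟩
  · intro r _
    apply (List.pairwise_map).mpr
    exact (PySem.List.pairwise_lt_pyRange_one 0 12).imp (fun h => Or.inr ⟨rfl, h⟩)
  · apply (PySem.List.pairwise_lt_pyRange_one 0 12).imp
    intro a b hab
    intro x hx y hy
    simp only [List.mem_map] at hx hy
    obtain ⟨c, _, rfl⟩ := hx
    obtain ⟨c', _, rfl⟩ := hy
    exact Or.inl hab

lemma pvLexLt_trans {x y z : Int × Int} (h1 : pvLexLt x y) (h2 : pvLexLt y z) : pvLexLt x z := by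
  rcases x with ⟨a, b⟩; rcases y with ⟨c, d⟩; rcases z with ⟨e, f⟩
  unfold pvLexLt at *; dsimp at *; omega

lemma pvLexLt_ne {x y : Int × Int} (h : pvLexLt x y) : x ≠ y := by
  rintro rfl
  rcases x with ⟨a, b⟩
  unfold pvLexLt at h; dsimp at h; omega

lemma pvGrid_nodup : pvGrid.Nodup :=
  pvGrid_sorted.imp (fun h => pvLexLt_ne h)

-- inner loop: adding fresh distinct cells is appending the matching ones
lemma pvFoldl_add_inner (P : Int → Int → Prop) [inst : ∀ r c, Decidable (P r c)] (r : Int)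
    (l : List Int) (acc : List (Int × Int)) (hnd : l.Nodup)
    (hacc : ∀ c ∈ l, (r, c) ∉ acc) :
    l.foldl (fun a c => if P r c then PySem.Set.add a (r, c) else a) acc
      = acc ++ (l.filter (fun c => decide (P r c))).map (fun c => (r, c)) := by
  induction l generalizing acc with
  | nil => simp
  | cons c cs ih =>
    have hcs : cs.Nodup := hnd.of_cons
    have hcne : c ∉ cs := (List.nodup_cons.mp hnd).1
    by_cases hP : P r c
    · have hmem : (r, c) ∉ acc := hacc c (List.mem_cons_self)
      have hacc' : ∀ c' ∈ cs, (r, c') ∉ acc ++ [(r, c)] := by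
        intro c' hc'
        simp only [List.mem_append, List.mem_singleton, Prod.mk.injEq]
        rintro (h | ⟨-, rfl⟩)
        · exact hacc c' (List.mem_cons_of_mem _ hc') h
        · exact hcne hc'
      simp only [List.foldl_cons, if_pos hP, PySem.Set.add_of_not_mem hmem]
      rw [ih _ hcs hacc']
      simp [List.filter_cons, hP]
    · simp only [List.foldl_cons, if_neg hP]
      rw [ih acc hcs (fun c' hc' => hacc c' (List.mem_cons_of_mem _ hc'))]
      simp [List.filter_cons, hP]

-- outer loop: the double fold collects, row by row, the matching cells
lemma pvFoldl_add_outer (P : Int → Int → Prop) [inst : ∀ r c, Decidable (P r c)]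
    (rows : List Int) (cols : List Int) (acc : List (Int × Int))
    (hr : rows.Nodup) (hc : cols.Nodup)
    (hacc : ∀ q ∈ acc, q.1 ∉ rows) :
    rows.foldl (fun a r =>
      cols.foldl (fun a c => if P r c then PySem.Set.add a (r, c) else a) a) acc
      = acc ++ rows.flatMap (fun r =>
          (cols.filter (fun c => decide (P r c))).map (fun c => (r, c))) := by
  induction rows generalizing acc with
  | nil => simp
  | cons r rs ih =>
    have hrs : rs.Nodup := hr.of_cons
    have hrne : r ∉ rs := (List.nodup_cons.mp hr).1
    simp only [List.foldl_cons]
    rw [pvFoldl_add_inner P r cols acc hc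
      (fun c hcm hmem => hacc _ hmem List.mem_cons_self)]
    have hacc' : ∀ q ∈ acc ++ (cols.filter (fun c => decide (P r c))).map (fun c => (r, c)),
        q.1 ∉ rs := by
      intro q hq
      rcases List.mem_append.mp hq with h | h
      · exact fun hmem => hacc q h (List.mem_cons_of_mem _ hmem)
      · obtain ⟨c, _, rfl⟩ := List.mem_map.mp h
        exact hrne
    rw [ih _ hrs hacc']
    simp

-- filter for a single cell over a duplicate-free list
lemma pvFilter_single (l : List (Int × Int)) (hl : l.Nodup) (t : Int × Int) :
    l.filter (fun x => x == t) = if t ∈ l then [t] else [] := by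
  induction l with
  | nil => simp
  | cons x xs ih =>
    have hxs := hl.of_cons
    have hx : x ∉ xs := (List.nodup_cons.mp hl).1
    by_cases hxt : x = t
    · subst hxt
      simp [List.filter_cons, ih hxs, hx]
    · simp [List.filter_cons, hxt, ih hxs, Ne.symm hxt]

-- filter for two lex-ordered cells over a lex-sorted list splits into two single filters
lemma pvFilter_pair (l : List (Int × Int)) (hl : l.Pairwise pvLexLt)
    (a b : Int × Int) (hab : pvLexLt a b) :
    l.filter (fun q => q == a || q == b)
      = l.filter (fun q => q == a) ++ l.filter (fun q => q == b) := by
  induction l with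
  | nil => simp
  | cons x xs ih =>
    obtain ⟨hhead, htail⟩ := List.pairwise_cons.mp hl
    by_cases hxa : x = a
    · subst hxa
      have hxb : x ≠ b := pvLexLt_ne hab
      simp [List.filter_cons, hxb, ih htail]
    · by_cases hxb : x = b
      · subst hxb
        have hanotin : a ∉ xs := by
          intro hmem
          exact pvLexLt_ne (pvLexLt_trans hab (hhead a hmem)) rfl
        have h1 : xs.filter (fun q => q == a) = [] := by
          rw [List.filter_eq_nil_iff]
          intro q hq hbeq
          exact hanotin (by rwa [eq_of_beq hbeq] at hq)
        simp [List.filter_cons, hxa, ih htail, h1]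
      · simp [List.filter_cons, hxa, hxb, ih htail]

-- the bridge: A's construct-then-filter set equals the grid scan for a lex-ordered pair
lemma pvBridge (x y : Int × Int)
    (hxy : x.1 < y.1 ∨ (x.1 = y.1 ∧ x.2 ≤ y.2)) :
    PySem.Set.ofList (List.filter pvInBounds (PySem.Set.ofList [x, y]))
      = pvGrid.filter (fun q => q == x || q == y) := by
  have hmem_iff : ∀ q : Int × Int, q ∈ pvGrid ↔ pvInBounds q = true := by
    intro q
    rw [pvMem_grid]
    simp [pvInBounds]
    tauto
  by_cases hxyeq : x = y
  · subst hxyeq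
    have h1 : PySem.Set.ofList [x, x] = [x] := by
      simp [PySem.Set.ofList, PySem.Set.add, PySem.Set.contains]
    have h2 : pvGrid.filter (fun q => q == x || q == x)
        = pvGrid.filter (fun q => q == x) := by
      apply List.filter_congr
      intro q _
      simp
    rw [h1, h2, pvFilter_single pvGrid pvGrid_nodup x,
        if_congr (hmem_iff x) rfl rfl]
    by_cases hb : pvInBounds x = true
    · simp [List.filter_cons, hb, PySem.Set.ofList, PySem.Set.add, PySem.Set.contains]
    · rw [Bool.not_eq_true] at hb
      simp [List.filter_cons, hb, PySem.Set.ofList]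
  · have hlt : pvLexLt x y := by
      unfold pvLexLt
      rcases hxy with h | ⟨h1, h2⟩
      · exact Or.inl h
      · rcases lt_or_eq_of_le h2 with h3 | h3
        · exact Or.inr ⟨h1, h3⟩
        · exact absurd (Prod.ext h1 h3) hxyeq
    have hyx : ¬ (y = x) := fun e => hxyeq e.symm
    have h1 : PySem.Set.ofList [x, y] = [x, y] := by
      simp [PySem.Set.ofList, PySem.Set.add, PySem.Set.contains, hyx]
    rw [h1, pvFilter_pair pvGrid pvGrid_sorted x y hlt,
        pvFilter_single pvGrid pvGrid_nodup x, pvFilter_single pvGrid pvGrid_nodup y,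
        if_congr (hmem_iff x) rfl rfl, if_congr (hmem_iff y) rfl rfl]
    by_cases hbx : pvInBounds x = true <;> by_cases hby : pvInBounds y = true
    · simp [List.filter_cons, hbx, hby, PySem.Set.ofList, PySem.Set.add,
        PySem.Set.contains, hyx]
    · rw [Bool.not_eq_true] at hby
      simp [List.filter_cons, hbx, hby, PySem.Set.ofList, PySem.Set.add,
        PySem.Set.contains]
    · rw [Bool.not_eq_true] at hbx
      simp [List.filter_cons, hbx, hby, PySem.Set.ofList, PySem.Set.add,
        PySem.Set.contains]
    · rw [Bool.not_eq_true] at hbx hby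
      simp [List.filter_cons, hbx, hby, PySem.Set.ofList]

-- ===== VERDICT (by name: the statement is the Claim_ definition above) =====
theorem antinodes_spec : Claim_equal_antinodes := by
  unfold Claim_equal_antinodes
  rintro ⟨r1, c1, s1⟩ ⟨r2, c2, s2⟩ _
  show antinodes _ _ = antinodes_alt _ _
  -- B side: turn the double fold into a filter of the row-major grid
  have hB : antinodes_alt (r1, c1, s1) (r2, c2, s2)
      = pvGrid.filter (fun q =>
          decide ((r1 - q.1 = r2 - r1 ∧ c1 - q.2 = c2 - c1) ∨
                  (r2 - q.1 = r1 - r2 ∧ c2 - q.2 = c1 - c2))) := by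
    simp only [antinodes_alt]
    rw [pvFoldl_add_outer
      (fun r c => (r1 - r = r2 - r1 ∧ c1 - c = c2 - c1) ∨
                  (r2 - r = r1 - r2 ∧ c2 - c = c1 - c2))
      (PySem.List.pyRange 0 12 1) (PySem.List.pyRange 0 12 1) []
      (PySem.List.nodup_pyRange_one 0 12) (PySem.List.nodup_pyRange_one 0 12)
      (by intro q h; simp at h)]
    simp only [pvGrid, List.filter_flatMap, List.filter_map, List.nil_append]
    rfl
  rw [hB]
  -- rewrite B's test as equality with the two mirror points t1, t2
  have hB2 : pvGrid.filter (fun q =>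
          decide ((r1 - q.1 = r2 - r1 ∧ c1 - q.2 = c2 - c1) ∨
                  (r2 - q.1 = r1 - r2 ∧ c2 - q.2 = c1 - c2)))
        = pvGrid.filter (fun q =>
            q == ((2 * r1 - r2, 2 * c1 - c2) : Int × Int) ||
            q == ((2 * r2 - r1, 2 * c2 - c1) : Int × Int)) := by
    apply List.filter_congr
    rintro ⟨a, b⟩ _
    rw [Bool.eq_iff_iff]
    simp only [decide_eq_true_eq, Bool.or_eq_true, beq_iff_eq, Prod.mk.injEq]
    omega
  rw [hB2]
  have hswap : pvGrid.filter (fun q =>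
            q == ((2 * r1 - r2, 2 * c1 - c2) : Int × Int) ||
            q == ((2 * r2 - r1, 2 * c2 - c1) : Int × Int))
        = pvGrid.filter (fun q =>
            q == ((2 * r2 - r1, 2 * c2 - c1) : Int × Int) ||
            q == ((2 * r1 - r2, 2 * c1 - c2) : Int × Int)) := by
    apply List.filter_congr
    intro q _
    simp only [Bool.or_comm]
  -- A side: case analysis on the branch, then the bridge
  simp only [antinodes]
  split_ifs with hA
  · rcases hA with ⟨h1, h2⟩ | ⟨h1, h2⟩
    · -- antinode1 = 2*p2 - p1, antinode2 = 2*p1 - p2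
      have e1 : ((min r1 r2 - |r1 - r2|, min c1 c2 - |c1 - c2|) : Int × Int)
          = (2 * r2 - r1, 2 * c2 - c1) := by
        simp only [Prod.mk.injEq, abs_eq_max_neg, min_def, max_def]
        constructor <;> (split_ifs <;> omega)
      have e2 : ((max r1 r2 + |r1 - r2|, max c1 c2 + |c1 - c2|) : Int × Int)
          = (2 * r1 - r2, 2 * c1 - c2) := by
        simp only [Prod.mk.injEq, abs_eq_max_neg, min_def, max_def]
        constructor <;> (split_ifs <;> omega)
      rw [hswap]
      simp only [e1, e2]
      exact pvBridge _ _ (by dsimp; omega)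
    · have e1 : ((min r1 r2 - |r1 - r2|, min c1 c2 - |c1 - c2|) : Int × Int)
          = (2 * r1 - r2, 2 * c1 - c2) := by
        simp only [Prod.mk.injEq, abs_eq_max_neg, min_def, max_def]
        constructor <;> (split_ifs <;> omega)
      have e2 : ((max r1 r2 + |r1 - r2|, max c1 c2 + |c1 - c2|) : Int × Int)
          = (2 * r2 - r1, 2 * c2 - c1) := by
        simp only [Prod.mk.injEq, abs_eq_max_neg, min_def, max_def]
        constructor <;> (split_ifs <;> omega)
      simp only [e1, e2]
      exact pvBridge _ _ (by dsimp; omega)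
  · push Not at hA
    by_cases hr : r2 ≤ r1
    · -- r1 > r2, c1 < c2: antinode1 = 2*p2 - p1
      obtain ⟨ha, hb⟩ := hA
      have e1 : ((min r1 r2 - |r1 - r2|, max c1 c2 + |c1 - c2|) : Int × Int)
          = (2 * r2 - r1, 2 * c2 - c1) := by
        simp only [Prod.mk.injEq, abs_eq_max_neg, min_def, max_def]
        constructor <;> (split_ifs <;> omega)
      have e2 : ((max r1 r2 + |r1 - r2|, min c1 c2 - |c1 - c2|) : Int × Int)
          = (2 * r1 - r2, 2 * c1 - c2) := by
        simp only [Prod.mk.injEq, abs_eq_max_neg, min_def, max_def]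
        constructor <;> (split_ifs <;> omega)
      rw [hswap]
      simp only [e1, e2]
      refine pvBridge _ _ ?_
      dsimp
      have := ha hr
      omega
    · -- r1 < r2, c1 > c2: antinode1 = 2*p1 - p2
      obtain ⟨ha, hb⟩ := hA
      have e1 : ((min r1 r2 - |r1 - r2|, max c1 c2 + |c1 - c2|) : Int × Int)
          = (2 * r1 - r2, 2 * c1 - c2) := by
        simp only [Prod.mk.injEq, abs_eq_max_neg, min_def, max_def]
        constructor <;> (split_ifs <;> omega)
      have e2 : ((max r1 r2 + |r1 - r2|, min c1 c2 - |c1 - c2|) : Int × Int)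
          = (2 * r2 - r1, 2 * c2 - c1) := by
        simp only [Prod.mk.injEq, abs_eq_max_neg, min_def, max_def]
        constructor <;> (split_ifs <;> omega)
      simp only [e1, e2]
      refine pvBridge _ _ ?_
      dsimp
      omega
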